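-- pv_equiv track=rewrite | github.com/SuftinK/Project_Euler | 5/5.py | divided_with_out_remainder
-- ===== SOURCE A (Python) =====
-- def divided_with_out_remainder(n:int) -> bool:
--     n_str = str(n)
--     if int(n_str[len(n_str)-1:]) != 0:
--         return False
--     if n % 2 != 0:
--         return False
--     for i in range(3, 20):
--         if n % i != 0:
--             return False
--     return True
-- ===== SOURCE B (Python) =====
-- def divided_with_out_remainder(n: int) -> bool:
--     # 232792560 = lcm(1, 2, ..., 20): n is divisible by every i in 1..20
--     # (and ends in 0) exactly when it is a multiple of this lcm.
--     return n % 232792560 == 0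
-- ===== Notes on version B (the rewrite author's own statement) =====
-- stated objective: simpler
-- what changed: Replaces the string last-digit guard and the 17-iteration divisibility loop with a single modulo test against 232792560 = lcm(1..20), to which the two guards and the loop are jointly equivalent.
import Mathlib
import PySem

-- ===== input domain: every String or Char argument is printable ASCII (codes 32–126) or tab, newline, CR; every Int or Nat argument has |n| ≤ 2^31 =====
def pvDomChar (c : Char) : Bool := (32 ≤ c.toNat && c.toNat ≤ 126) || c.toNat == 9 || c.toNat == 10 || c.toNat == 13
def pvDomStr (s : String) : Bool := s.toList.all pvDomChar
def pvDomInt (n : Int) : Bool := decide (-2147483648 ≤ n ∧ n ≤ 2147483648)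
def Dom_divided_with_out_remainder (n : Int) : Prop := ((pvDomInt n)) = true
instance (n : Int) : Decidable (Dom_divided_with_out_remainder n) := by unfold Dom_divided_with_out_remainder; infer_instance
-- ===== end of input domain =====

-- B replaces A's string last-digit guard and its 17-step divisibility loop by one
-- modulo test against 232792560 = lcm(1..20), to which the guards are jointly equivalent.

-- ===== PORT A =====
def divided_with_out_remainder (n : Int) : Bool :=
  -- n_str = str(n); int(n_str[len(n_str)-1:]): ofStr? none would be Python's ValueError,
  -- which never occurs here since the slice is always a single decimal digit (proved below).
  match PySem.Int.ofStr? (PySem.Str.slice (PySem.Int.toStr n)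
      (some (PySem.Str.len (PySem.Int.toStr n) - 1)) none) with
  | none => false
  | some d =>
    if d ≠ 0 then false
    else if PySem.Int.mod n 2 ≠ 0 then false
    else (PySem.List.pyRange 3 20 1).all (fun i => PySem.Int.mod n i == 0)

-- ===== PORT B =====
def divided_with_out_remainder_alt (n : Int) : Bool :=
  PySem.Int.mod n 232792560 == 0

-- ===== PRECONDITION & SPEC =====
def Spec_divided_with_out_remainder (n : Int) (out : Bool) : Prop := out = divided_with_out_remainder_alt n
instance (n : Int) (out : Bool) : Decidable (Spec_divided_with_out_remainder n out) := by unfold Spec_divided_with_out_remainder; infer_instance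

-- ===== CLAIM (what is proved, stated in full; the proofs are below) =====
def Claim_equal_divided_with_out_remainder : Prop := ∀ (n : Int), Dom_divided_with_out_remainder n → Spec_divided_with_out_remainder n (divided_with_out_remainder n)

-- ===== LEMMAS AND PROOFS =====

-- toDigitsCore only prepends to its accumulator, so a nonempty accumulator keeps its last element.
lemma tdc_getLast? (b f n : Nat) (ds : List Char) (h : ds ≠ []) :
    (Nat.toDigitsCore b f n ds).getLast? = ds.getLast? := by
  induction f generalizing n ds with
  | zero => simp [Nat.toDigitsCore]
  | succ f ih =>
    rw [Nat.toDigitsCore]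
    cases ds with
    | nil => exact absurd rfl h
    | cons x l =>
      by_cases hz : n / b = 0
      · rw [if_pos hz]
        exact List.getLast?_cons_cons ..
      · rw [if_neg hz, ih (n / b) _ (by simp)]
        exact List.getLast?_cons_cons ..

-- The last character str(m) puts down is the digit of m % 10.
lemma toDigits_getLast? (n : Nat) :
    (Nat.toDigits 10 n).getLast? = some (Nat.digitChar (n % 10)) := by
  rw [Nat.toDigits, Nat.toDigitsCore]
  by_cases hz : n / 10 = 0
  · rw [if_pos hz]; rfl
  · rw [if_neg hz, tdc_getLast? _ _ _ _ (by simp)]; rfl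

-- last character of str(n) for an arbitrary Int
lemma toChars_getLast? (n : Int) :
    (PySem.Int.toChars n).getLast? = some (Nat.digitChar (n.natAbs % 10)) := by
  unfold PySem.Int.toChars
  by_cases h : n < 0
  · rw [if_pos h, List.getLast?_cons, toDigits_getLast?]
    simp
  · rw [if_neg h]
    have : n.toNat = n.natAbs := by omega
    rw [this, toDigits_getLast?]

lemma toChars_ne_nil (n : Int) : PySem.Int.toChars n ≠ [] := by
  intro h
  have := toChars_getLast? n
  rw [h] at this
  simp at this

lemma drop_length_sub_one {α : Type} (l : List α) (h : l ≠ []) :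
    l.drop (l.length - 1) = l.getLast?.toList := by
  induction l with
  | nil => simp at h
  | cons a l ih =>
    cases l with
    | nil => simp
    | cons b l' =>
      simp only [List.length_cons, Nat.add_sub_cancel, List.drop_succ_cons,
        List.getLast?_cons_cons]
      exact ih (by simp)

-- the whole last-digit guard of A: int(str(n)[-1:]) = |n| % 10
lemma guard_value (n : Int) :
    PySem.Int.ofStr? (PySem.Str.slice (PySem.Int.toStr n)
        (some (PySem.Str.len (PySem.Int.toStr n) - 1)) none)
      = some ((n.natAbs % 10 : Nat) : Int) := by
  have hlist : (PySem.Int.toStr n).toList = PySem.Int.toChars n := PySem.Int.toList_toStr n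
  have hne : PySem.Int.toChars n ≠ [] := toChars_ne_nil n
  have hlen : 1 ≤ (PySem.Int.toChars n).length := by
    cases hc : PySem.Int.toChars n with
    | nil => exact absurd hc hne
    | cons a l => simp
  rw [PySem.Str.len, PySem.Int.ofStr?, PySem.Str.slice, hlist]
  rw [String.toList_ofList, PySem.Chars.slice_eq_listSlice]
  have hcast : ((PySem.Int.toChars n).length : Int) - 1
      = (((PySem.Int.toChars n).length - 1 : Nat) : Int) := by omega
  rw [hcast, PySem.List.slice_from_natCast, drop_length_sub_one _ hne, toChars_getLast?]
  have h10 : n.natAbs % 10 < 10 := Nat.mod_lt _ (by omega)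
  set r := n.natAbs % 10 with hr
  interval_cases r <;> decide

-- the arithmetic core: divisible by 10 and by every i in 2..19 ⟺ divisible by lcm(1..20)
lemma lcm_iff (n : Int) :
    ((10:Int) ∣ n ∧ (2:Int) ∣ n ∧ (3:Int) ∣ n ∧ (4:Int) ∣ n ∧ (5:Int) ∣ n ∧ (6:Int) ∣ n ∧
     (7:Int) ∣ n ∧ (8:Int) ∣ n ∧ (9:Int) ∣ n ∧ (11:Int) ∣ n ∧ (12:Int) ∣ n ∧ (13:Int) ∣ n ∧
     (14:Int) ∣ n ∧ (15:Int) ∣ n ∧ (16:Int) ∣ n ∧ (17:Int) ∣ n ∧ (18:Int) ∣ n ∧ (19:Int) ∣ n)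
      ↔ (232792560:Int) ∣ n := by
  constructor
  · rintro ⟨-, -, -, -, h5, -, h7, -, h9, h11, -, h13, -, -, h16, h17, -, h19⟩
    have c : ∀ a b : Int, Int.gcd a b = 1 → IsCoprime a b :=
      fun a b h => Int.isCoprime_iff_gcd_eq_one.mpr h
    have d1 : (144:Int) ∣ n := (c 16 9 (by decide)).mul_dvd h16 h9
    have d2 : (720:Int) ∣ n := (c 144 5 (by decide)).mul_dvd d1 h5
    have d3 : (5040:Int) ∣ n := (c 720 7 (by decide)).mul_dvd d2 h7
    have d4 : (55440:Int) ∣ n := (c 5040 11 (by decide)).mul_dvd d3 h11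
    have d5 : (720720:Int) ∣ n := (c 55440 13 (by decide)).mul_dvd d4 h13
    have d6 : (12252240:Int) ∣ n := (c 720720 17 (by decide)).mul_dvd d5 h17
    exact (c 12252240 19 (by decide)).mul_dvd d6 h19
  · intro h
    refine ⟨?_, ?_, ?_, ?_, ?_, ?_, ?_, ?_, ?_, ?_, ?_, ?_, ?_, ?_, ?_, ?_, ?_, ?_⟩ <;>
      exact dvd_trans (by decide) h

-- ===== VERDICT (by name: the statement is the Claim_ definition above) =====
theorem divided_with_out_remainder_spec : Claim_equal_divided_with_out_remainder := by
  intro n _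
  show divided_with_out_remainder n = divided_with_out_remainder_alt n
  unfold divided_with_out_remainder divided_with_out_remainder_alt
  rw [guard_value n]
  have h10 : ((n.natAbs % 10 : Nat) : Int) = 0 ↔ (10:Int) ∣ n := by omega
  have hrange : PySem.List.pyRange 3 20 1 = [3,4,5,6,7,8,9,10,11,12,13,14,15,16,17,18,19] := by
    decide
  have hI : ∀ m : Int, (PySem.Int.mod n m == 0) = decide (m ∣ n) := by
    intro m
    apply Bool.eq_iff_iff.mpr
    simp [PySem.Int.mod_eq_zero_iff_dvd]
  have hfun : (fun i => PySem.Int.mod n i == 0) = fun i : Int => decide (i ∣ n) :=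
    funext fun i => hI i
  rw [hrange, hfun, hI 232792560]
  simp only [List.all_cons, List.all_nil, Bool.and_true]
  split_ifs with h1 h2
  · -- last digit nonzero: 10 ∤ n, hence lcm(1..20) ∤ n
    have hn : ¬ (232792560:Int) ∣ n := fun h =>
      (h1 ∘ h10.mpr) (dvd_trans (by decide : (10:Int) ∣ 232792560) h)
    simp [hn]
  · -- n odd: 2 ∤ n, hence lcm(1..20) ∤ n
    have h2' : ¬ (2:Int) ∣ n := fun h => h2 (PySem.Int.mod_eq_zero_iff_dvd n 2 |>.mpr h)
    have hn : ¬ (232792560:Int) ∣ n := fun h =>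
      h2' (dvd_trans (by decide : (2:Int) ∣ 232792560) h)
    simp [hn]
  · -- both guards passed: 10 ∣ n and 2 ∣ n
    have g10 : (10:Int) ∣ n := h10.mp (not_not.mp h1)
    have g2 : (2:Int) ∣ n := PySem.Int.mod_eq_zero_iff_dvd n 2 |>.mp (not_not.mp h2)
    by_cases hC : ((3:Int) ∣ n ∧ (4:Int) ∣ n ∧ (5:Int) ∣ n ∧ (6:Int) ∣ n ∧ (7:Int) ∣ n ∧
        (8:Int) ∣ n ∧ (9:Int) ∣ n ∧ (10:Int) ∣ n ∧ (11:Int) ∣ n ∧ (12:Int) ∣ n ∧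
        (13:Int) ∣ n ∧ (14:Int) ∣ n ∧ (15:Int) ∣ n ∧ (16:Int) ∣ n ∧ (17:Int) ∣ n ∧
        (18:Int) ∣ n ∧ (19:Int) ∣ n)
    · obtain ⟨g3, g4, g5, g6, g7, g8, g9, -, g11, g12, g13, g14, g15, g16, g17, g18, g19⟩ := hC
      have hd : (232792560:Int) ∣ n := (lcm_iff n).mp
        ⟨g10, g2, g3, g4, g5, g6, g7, g8, g9, g11, g12, g13, g14, g15, g16, g17, g18, g19⟩
      simp [g3, g4, g5, g6, g7, g8, g9, g10, g11, g12, g13, g14, g15, g16, g17, g18, g19, hd]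
    · have hd : ¬ (232792560:Int) ∣ n := fun h => by
        obtain ⟨-, -, g3, g4, g5, g6, g7, g8, g9, g11, g12, g13, g14, g15, g16, g17, g18, g19⟩ :=
          (lcm_iff n).mpr h
        exact hC ⟨g3, g4, g5, g6, g7, g8, g9, g10, g11, g12, g13, g14, g15, g16, g17, g18, g19⟩
      rw [decide_eq_false hd, Bool.eq_false_iff]
      intro habs
      simp only [Bool.and_eq_true, decide_eq_true_eq] at habs
      obtain ⟨g3, g4, g5, g6, g7, g8, g9, -, g11, g12, g13, g14, g15, g16, g17, g18, g19⟩ := habs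
      exact hC ⟨g3, g4, g5, g6, g7, g8, g9, g10, g11, g12, g13, g14, g15, g16, g17, g18, g19⟩
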